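-- pv_equiv track=rewrite | github.com/pakkio/pakagent | show_answer.py | parse_pakdiff
-- ===== SOURCE A (Python) =====
-- from typing import List, Tuple, Dict, Any
--
-- def parse_pakdiff(pakdiff_lines: List[str]) -> Tuple[List[str], Dict[str, List[str]]]:
--     """Parses pakdiff content and extracts summary and method content."""
--     summary = []
--     method_content = {}
--     current_file = None
--     current_method = None
--     current_content = []
--     in_replace_with = False
--
--     for line in pakdiff_lines:
--         line = line.rstrip()
--
--         if line.startswith("FILE:"):
--             if current_file and current_method:
--                 key = f"{current_file}: {current_method}"
--                 method_content[key] = current_content[:]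
--             current_file = line[5:].strip()
--             current_method = None
--             current_content = []
--             in_replace_with = False
--
--         elif line.startswith("FIND_METHOD:"):
--             if current_file and current_method:
--                 key = f"{current_file}: {current_method}"
--                 method_content[key] = current_content[:]
--             current_method = line[12:].strip()
--             if not current_method:
--                 current_method = "[NEW METHOD]"
--             summary.append(f"{current_file}: {current_method}")
--             current_content = []
--             in_replace_with = False
--
--         elif line.startswith("SECTION:"):
--             if current_file and current_method:
--                 key = f"{current_file}: {current_method}"
--                 method_content[key] = current_content[:]
--             section_type = line[8:].strip()
--             current_method = f"[{section_type}]"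
--             summary.append(f"{current_file}: {current_method}")
--             current_content = []
--             in_replace_with = False
--
--         elif line.startswith("REPLACE_WITH:"):
--             in_replace_with = True
--
--         elif in_replace_with and line.strip():
--             current_content.append(line)
--
--     if current_file and current_method:
--         key = f"{current_file}: {current_method}"
--         method_content[key] = current_content[:]
--
--     return summary, method_content
-- ===== SOURCE B (Python) =====
-- from typing import List, Tuple, Dict
--
-- def _after_marker(body: List[str]) -> List[str]:
--     """Lines strictly after the first REPLACE_WITH: marker (empty if none)."""
--     for i, l in enumerate(body):
--         if l.startswith("REPLACE_WITH:"):
--             return body[i + 1:]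
--     return []
--
-- def _extract(body: List[str]) -> List[str]:
--     return [l for l in _after_marker(body)
--             if l.strip() and not l.startswith("REPLACE_WITH:")]
--
-- def parse_pakdiff(pakdiff_lines: List[str]) -> Tuple[List[str], Dict[str, List[str]]]:
--     """Parses pakdiff content and extracts summary and method content."""
--     # Pass 1: cut the rstripped lines into segments at each header line.
--     segments = []
--     header = None
--     body = []
--     for raw in pakdiff_lines:
--         line = raw.rstrip()
--         if (line.startswith("FILE:") or line.startswith("FIND_METHOD:")
--                 or line.startswith("SECTION:")):
--             segments.append((header, body))
--             header, body = line, []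
--         else:
--             body.append(line)
--     segments.append((header, body))
--
--     # Pass 2: fold over the segments.
--     summary = []
--     method_content = {}
--     current_file = None
--     pending = None  # (key, raw body) of the method block awaiting recording
--     for header, body in segments:
--         if header is None:
--             continue
--         if pending is not None:
--             method_content[pending[0]] = _extract(pending[1])
--         if header.startswith("FILE:"):
--             current_file = header[5:].strip()
--             pending = None
--         else:
--             if header.startswith("FIND_METHOD:"):
--                 method = header[12:].strip() or "[NEW METHOD]"
--             else:
--                 method = f"[{header[8:].strip()}]"
--             key = f"{current_file}: {method}"
--             summary.append(key)
--             pending = (key, body) if current_file else None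
--     if pending is not None:
--         method_content[pending[0]] = _extract(pending[1])
--     return summary, method_content
-- ===== Notes on version B (the rewrite author's own statement) =====
-- stated objective: alternative
-- what changed: A's single-pass six-variable state machine is replaced by a two-pass decomposition: pass 1 cuts the rstripped lines into segments at FILE:/FIND_METHOD:/SECTION: headers, pass 2 folds over the segments keeping only current_file and a pending (key, raw body) block whose content is extracted (lines after the first REPLACE_WITH:, non-blank) only when the block is recorded.
import Mathlib
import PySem

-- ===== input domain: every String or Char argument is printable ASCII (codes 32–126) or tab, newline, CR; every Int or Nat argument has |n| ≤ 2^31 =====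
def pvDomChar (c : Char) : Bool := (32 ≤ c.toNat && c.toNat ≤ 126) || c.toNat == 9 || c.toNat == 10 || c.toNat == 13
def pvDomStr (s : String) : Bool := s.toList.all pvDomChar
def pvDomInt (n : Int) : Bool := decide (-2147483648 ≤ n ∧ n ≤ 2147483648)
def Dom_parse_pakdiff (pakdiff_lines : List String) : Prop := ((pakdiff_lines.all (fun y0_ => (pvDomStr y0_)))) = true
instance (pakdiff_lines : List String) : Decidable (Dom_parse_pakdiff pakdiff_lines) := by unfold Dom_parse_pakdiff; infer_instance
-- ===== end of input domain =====

-- B re-decomposes A's single 6-variable state machine into two passes (cut into header segments,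
-- then fold over segments with a pending method block); same asymptotic cost (objective: alternative).

-- Python truthiness of a string: nonempty
def pvTruthy (s : String) : Bool := !s.toList.isEmpty

-- f-string rendering of the Optional current_file (None prints as "None")
def pvFmtFile : Option String → String
  | none => "None"
  | some s => s

-- ===== PORT A =====
structure AState where
  summary : List String
  method_content : PySem.Dict String (List String)
  current_file : Option String
  current_method : Option String
  current_content : List String
  in_replace_with : Bool

-- 'if current_file and current_method: method_content[key] = current_content[:]'
def flushA (st : AState) : PySem.Dict String (List String) :=
  match st.current_file, st.current_method with
  | some f, some m =>
      if pvTruthy f && pvTruthy m then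
        st.method_content.insert (f ++ ": " ++ m) st.current_content
      else st.method_content
  | _, _ => st.method_content

def parse_pakdiff_step (st : AState) (raw : String) : AState :=
  let line := PySem.Str.rstrip raw
  if PySem.Str.startswith line "FILE:" then
    { summary := st.summary
      method_content := flushA st
      current_file := some (PySem.Str.strip (PySem.Str.slice line (some 5) none))
      current_method := none
      current_content := []
      in_replace_with := false }
  else if PySem.Str.startswith line "FIND_METHOD:" then
    let mc := flushA st
    let cm0 := PySem.Str.strip (PySem.Str.slice line (some 12) none)
    let cm := if pvTruthy cm0 then cm0 else "[NEW METHOD]"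
    { summary := st.summary ++ [pvFmtFile st.current_file ++ ": " ++ cm]
      method_content := mc
      current_file := st.current_file
      current_method := some cm
      current_content := []
      in_replace_with := false }
  else if PySem.Str.startswith line "SECTION:" then
    let mc := flushA st
    let cm := "[" ++ PySem.Str.strip (PySem.Str.slice line (some 8) none) ++ "]"
    { summary := st.summary ++ [pvFmtFile st.current_file ++ ": " ++ cm]
      method_content := mc
      current_file := st.current_file
      current_method := some cm
      current_content := []
      in_replace_with := false }
  else if PySem.Str.startswith line "REPLACE_WITH:" then
    { st with in_replace_with := true }
  else if st.in_replace_with && pvTruthy (PySem.Str.strip line) then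
    { st with current_content := st.current_content ++ [line] }
  else st

def parse_pakdiff (pakdiff_lines : List String) : List String × (List (String × List String)) :=
  let st := pakdiff_lines.foldl parse_pakdiff_step
    { summary := [], method_content := PySem.Dict.empty, current_file := none,
      current_method := none, current_content := [], in_replace_with := false }
  (st.summary, (flushA st).items)

-- ===== PORT B =====
def pvIsHeader (line : String) : Bool :=
  PySem.Str.startswith line "FILE:" || PySem.Str.startswith line "FIND_METHOD:"
    || PySem.Str.startswith line "SECTION:"

-- pass 1: cut the rstripped lines into segments at each header line
def pvSegStep (st : List (Option String × List String) × Option String × List String)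
    (raw : String) : List (Option String × List String) × Option String × List String :=
  let line := PySem.Str.rstrip raw
  if pvIsHeader line then (st.1 ++ [(st.2.1, st.2.2)], some line, [])
  else (st.1, st.2.1, st.2.2 ++ [line])

def pvSegments (lines : List String) : List (Option String × List String) :=
  let t := lines.foldl pvSegStep ([], none, [])
  t.1 ++ [(t.2.1, t.2.2)]

-- lines strictly after the first REPLACE_WITH: marker (empty if none)
def pvAfterMarker : List String → List String
  | [] => []
  | l :: rest => if PySem.Str.startswith l "REPLACE_WITH:" then rest else pvAfterMarker rest

def pvExtract (body : List String) : List String :=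
  (pvAfterMarker body).filter
    (fun l => pvTruthy (PySem.Str.strip l) && !PySem.Str.startswith l "REPLACE_WITH:")

structure BState where
  summary : List String
  method_content : PySem.Dict String (List String)
  current_file : Option String
  pending : Option (String × List String)

def flushB (st : BState) : PySem.Dict String (List String) :=
  match st.pending with
  | some (k, b) => st.method_content.insert k (pvExtract b)
  | none => st.method_content

-- pass 2: fold over the segments
def pvBStep (st : BState) (seg : Option String × List String) : BState :=
  match seg.1 with
  | none => st
  | some header =>
    let mc := flushB st
    if PySem.Str.startswith header "FILE:" then
      { summary := st.summary, method_content := mc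
        current_file := some (PySem.Str.strip (PySem.Str.slice header (some 5) none))
        pending := none }
    else
      let method :=
        if PySem.Str.startswith header "FIND_METHOD:" then
          let m0 := PySem.Str.strip (PySem.Str.slice header (some 12) none)
          if pvTruthy m0 then m0 else "[NEW METHOD]"
        else "[" ++ PySem.Str.strip (PySem.Str.slice header (some 8) none) ++ "]"
      let key := pvFmtFile st.current_file ++ ": " ++ method
      { summary := st.summary ++ [key], method_content := mc
        current_file := st.current_file
        pending :=
          match st.current_file with
          | some f => if pvTruthy f then some (key, seg.2) else none
          | none => none }

def parse_pakdiff_alt (pakdiff_lines : List String) : List String × (List (String × List String)) :=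
  let st := (pvSegments pakdiff_lines).foldl pvBStep
    { summary := [], method_content := PySem.Dict.empty, current_file := none, pending := none }
  (st.summary, (flushB st).items)

-- ===== PRECONDITION & SPEC =====
def Spec_parse_pakdiff (pakdiff_lines : List String) (out : List String × (List (String × List String))) : Prop := out = parse_pakdiff_alt pakdiff_lines
instance (pakdiff_lines : List String) (out : List String × (List (String × List String))) : Decidable (Spec_parse_pakdiff pakdiff_lines out) := by unfold Spec_parse_pakdiff; infer_instance

-- ===== CLAIM (what is proved, stated in full; the proofs are below) =====
def Claim_equal_parse_pakdiff : Prop := ∀ (pakdiff_lines : List String), Dom_parse_pakdiff pakdiff_lines → Spec_parse_pakdiff pakdiff_lines (parse_pakdiff pakdiff_lines)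

-- ===== LEMMAS AND PROOFS =====

-- A's per-segment content accumulator (the last two elif branches of A's loop)
def pvProcSeg (p : List String × Bool) (l : String) : List String × Bool :=
  if PySem.Str.startswith l "REPLACE_WITH:" then (p.1, true)
  else if p.2 && pvTruthy (PySem.Str.strip l) then (p.1 ++ [l], p.2)
  else p

def pvProcBody (body : List String) : List String × Bool :=
  body.foldl pvProcSeg ([], false)

-- B's pending field as a function of A's (file, method) and the raw segment body
def pvPendOf (f? : Option String) (m? : Option String) (body : List String) :
    Option (String × List String) :=
  match f?, m? with
  | some f, some m =>
      if pvTruthy f && pvTruthy m then some (f ++ ": " ++ m, body) else none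
  | _, _ => none

-- the coupling invariant: stA is A's state after some prefix, stB is B's pass-2 state before
-- the currently open segment (h, body)
def pvInv (stA : AState) (stB : BState) (h : Option String) (body : List String) : Prop :=
  let c := pvBStep stB (h, body)
  stA.summary = c.summary ∧
  stA.method_content = c.method_content ∧
  stA.current_file = c.current_file ∧
  (stA.current_content, stA.in_replace_with) = pvProcBody body ∧
  c.pending = pvPendOf stA.current_file stA.current_method body ∧
  (h = none → stA.current_method = none)

def pvRunA (stA : AState) (lines : List String) :
    List String × (List (String × List String)) :=
  let s := lines.foldl parse_pakdiff_step stA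
  (s.summary, (flushA s).items)

def pvRunB (stB : BState) (segs : List (Option String × List String)) :
    List String × (List (String × List String)) :=
  let s := segs.foldl pvBStep stB
  (s.summary, (flushB s).items)

def pvSegsFrom (h : Option String) (b : List String) (lines : List String) :
    List (Option String × List String) :=
  let t := lines.foldl pvSegStep ([], h, b)
  t.1 ++ [(t.2.1, t.2.2)]

theorem pvExtract_true (body : List String) (c : List String) :
    (body.foldl pvProcSeg (c, true)).1 =
      c ++ body.filter (fun l => pvTruthy (PySem.Str.strip l) && !PySem.Str.startswith l "REPLACE_WITH:") := by
  induction body generalizing c with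
  | nil => simp
  | cons l rest ih =>
    by_cases h : PySem.Str.startswith l "REPLACE_WITH:" = true
    all_goals simp at h
    · simp [pvProcSeg, h, ih]
    · by_cases h2 : pvTruthy (PySem.Str.strip l) = true
      · simp [pvProcSeg, h, h2, ih]
      · simp [pvProcSeg, h, h2, ih]

theorem pvExtract_eq (body : List String) : pvExtract body = (pvProcBody body).1 := by
  unfold pvProcBody
  induction body with
  | nil => simp [pvExtract, pvAfterMarker]
  | cons l rest ih =>
    by_cases h : PySem.Str.startswith l "REPLACE_WITH:" = true
    all_goals simp at h
    · simp [pvProcSeg, pvExtract, pvAfterMarker, h, pvExtract_true]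
    · simp only [List.foldl_cons, pvProcSeg, pvExtract, pvAfterMarker] at *
      simp [h] at *
      simpa [pvExtract] using ih

theorem pvFlush_eq (stA : AState) (stB : BState) (h : Option String) (body : List String)
    (hi : pvInv stA stB h body) : flushA stA = flushB (pvBStep stB (h, body)) := by
  obtain ⟨h1, h2, h3, h4, h5, h6⟩ := hi
  have h4' : stA.current_content = (pvProcBody body).1 := by
    have := congrArg Prod.fst h4; simpa using this
  unfold flushA flushB
  rw [h5]
  unfold pvPendOf
  cases hf : stA.current_file with
  | none => exact h2
  | some f =>
    cases hm : stA.current_method with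
    | none => exact h2
    | some m =>
      by_cases ht : (pvTruthy f && pvTruthy m) = true
      · simp [ht, h2, h4', pvExtract_eq]
      · simp [ht, h2]

-- pass-1 fold with a segment accumulator splits off the accumulator
theorem pvSegStep_acc (lines : List String)
    (segs : List (Option String × List String)) (h : Option String) (b : List String) :
    lines.foldl pvSegStep (segs, h, b) =
      (segs ++ (lines.foldl pvSegStep ([], h, b)).1, (lines.foldl pvSegStep ([], h, b)).2) := by
  induction lines generalizing segs h b with
  | nil => simp
  | cons l rest ih =>
    simp only [List.foldl_cons, pvSegStep]
    by_cases hh : pvIsHeader (PySem.Str.rstrip l) = true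
    · simp only [if_pos hh]
      rw [ih (segs ++ [(h, b)]), ih ([] ++ [(h, b)])]
      simp
    · simp only [if_neg hh]
      exact ih segs h (b ++ [PySem.Str.rstrip l])

-- pvBStep reads the segment body only as the pending payload
theorem pvBStep_body (stB : BState) (header : String) (b b' : List String) :
    (pvBStep stB (some header, b')).summary = (pvBStep stB (some header, b)).summary ∧
    (pvBStep stB (some header, b')).method_content = (pvBStep stB (some header, b)).method_content ∧
    (pvBStep stB (some header, b')).current_file = (pvBStep stB (some header, b)).current_file ∧
    (pvBStep stB (some header, b')).pending =
      (pvBStep stB (some header, b)).pending.map (fun p => (p.1, b')) := by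
  simp only [pvBStep]
  by_cases hF : PySem.Str.startswith header "FILE:" = true
  · simp only [if_pos hF]
    simp
  · simp only [if_neg hF]
    cases stB.current_file with
    | none => simp
    | some f =>
      by_cases ht : pvTruthy f = true
      · simp [ht]
      · simp [ht]

-- splitting off the three header tests from one pvIsHeader fact
theorem pvHeader_cases (line : String) (hh : pvIsHeader line = true)
    (hF : ¬ PySem.Str.startswith line "FILE:" = true)
    (hM : ¬ PySem.Str.startswith line "FIND_METHOD:" = true) :
    PySem.Str.startswith line "SECTION:" = true := by
  simp only [pvIsHeader, Bool.or_eq_true] at hh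
  rcases hh with (h' | h') | h'
  · exact absurd h' hF
  · exact absurd h' hM
  · exact h'

theorem pvNotHeader_cases (line : String) (hh : ¬ pvIsHeader line = true) :
    ¬ PySem.Str.startswith line "FILE:" = true ∧
    ¬ PySem.Str.startswith line "FIND_METHOD:" = true ∧
    ¬ PySem.Str.startswith line "SECTION:" = true := by
  simp only [pvIsHeader, Bool.or_eq_true, not_or] at hh
  exact ⟨hh.1.1, hh.1.2, hh.2⟩

theorem pvTruthy_new_method : pvTruthy "[NEW METHOD]" = true := by decide

theorem pvTruthy_brackets (s : String) : pvTruthy ("[" ++ s ++ "]") = true := by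
  simp [pvTruthy, String.toList_append]

-- invariant preservation: header line closes the open segment and starts a new one
theorem pvInv_header (stA : AState) (stB : BState) (h : Option String) (body : List String)
    (l : String) (hh : pvIsHeader (PySem.Str.rstrip l) = true)
    (hi : pvInv stA stB h body) :
    pvInv (parse_pakdiff_step stA l) (pvBStep stB (h, body)) (some (PySem.Str.rstrip l)) [] := by
  have hfl := pvFlush_eq stA stB h body hi
  obtain ⟨h1, h2, h3, h4, h5, h6⟩ := hi
  set c := pvBStep stB (h, body) with hc
  simp only [pvInv]
  by_cases hF : PySem.Str.startswith (PySem.Str.rstrip l) "FILE:" = true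
  · have hA : parse_pakdiff_step stA l = ⟨stA.summary, flushA stA,
        some (PySem.Str.strip (PySem.Str.slice (PySem.Str.rstrip l) (some 5) none)),
        none, [], false⟩ := by
      simp only [parse_pakdiff_step, if_pos hF]
    have hB : pvBStep c (some (PySem.Str.rstrip l), []) = ⟨c.summary, flushB c,
        some (PySem.Str.strip (PySem.Str.slice (PySem.Str.rstrip l) (some 5) none)),
        none⟩ := by
      simp only [pvBStep, if_pos hF]
    rw [hA, hB]
    exact ⟨h1, hfl, rfl, rfl, by cases hf : stA.current_file <;> rfl, fun hcon => by cases hcon⟩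
  · by_cases hM : PySem.Str.startswith (PySem.Str.rstrip l) "FIND_METHOD:" = true
    · have hA : parse_pakdiff_step stA l = ⟨stA.summary ++
          [pvFmtFile stA.current_file ++ ": " ++
            (if pvTruthy (PySem.Str.strip (PySem.Str.slice (PySem.Str.rstrip l) (some 12) none)) = true
              then PySem.Str.strip (PySem.Str.slice (PySem.Str.rstrip l) (some 12) none)
              else "[NEW METHOD]")],
          flushA stA, stA.current_file,
          some (if pvTruthy (PySem.Str.strip (PySem.Str.slice (PySem.Str.rstrip l) (some 12) none)) = true
              then PySem.Str.strip (PySem.Str.slice (PySem.Str.rstrip l) (some 12) none)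
              else "[NEW METHOD]"),
          [], false⟩ := by
        simp only [parse_pakdiff_step, if_neg hF, if_pos hM]
      have hB : pvBStep c (some (PySem.Str.rstrip l), []) = ⟨c.summary ++
          [pvFmtFile c.current_file ++ ": " ++
            (if pvTruthy (PySem.Str.strip (PySem.Str.slice (PySem.Str.rstrip l) (some 12) none)) = true
              then PySem.Str.strip (PySem.Str.slice (PySem.Str.rstrip l) (some 12) none)
              else "[NEW METHOD]")],
          flushB c, c.current_file,
          (match c.current_file with
            | some f => if pvTruthy f then
                some (pvFmtFile c.current_file ++ ": " ++
                  (if pvTruthy (PySem.Str.strip (PySem.Str.slice (PySem.Str.rstrip l) (some 12) none)) = true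
                    then PySem.Str.strip (PySem.Str.slice (PySem.Str.rstrip l) (some 12) none)
                    else "[NEW METHOD]"), ([] : List String))
              else none
            | none => none)⟩ := by
        simp only [pvBStep, if_neg hF, if_pos hM]
      rw [hA, hB]
      refine ⟨by rw [h1, h3], hfl, h3, rfl, ?_, fun hcon => by cases hcon⟩
      rw [← h3]
      cases stA.current_file with
      | none => rfl
      | some f =>
        have hcm : pvTruthy (if pvTruthy (PySem.Str.strip (PySem.Str.slice (PySem.Str.rstrip l) (some 12) none)) = true
              then PySem.Str.strip (PySem.Str.slice (PySem.Str.rstrip l) (some 12) none)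
              else "[NEW METHOD]") = true := by
          by_cases h0 : pvTruthy (PySem.Str.strip (PySem.Str.slice (PySem.Str.rstrip l) (some 12) none)) = true
          · simp only [if_pos h0]; exact h0
          · simp only [if_neg h0]; exact pvTruthy_new_method
        by_cases htf : pvTruthy f = true
        · simp only [pvPendOf, if_pos htf, hcm, Bool.and_true, pvFmtFile]
        · simp only [pvPendOf, if_neg htf]
          simp [eq_false_of_ne_true htf]
    · have hS := pvHeader_cases _ hh hF hM
      have hA : parse_pakdiff_step stA l = ⟨stA.summary ++
          [pvFmtFile stA.current_file ++ ": " ++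
            ("[" ++ PySem.Str.strip (PySem.Str.slice (PySem.Str.rstrip l) (some 8) none) ++ "]")],
          flushA stA, stA.current_file,
          some ("[" ++ PySem.Str.strip (PySem.Str.slice (PySem.Str.rstrip l) (some 8) none) ++ "]"),
          [], false⟩ := by
        simp only [parse_pakdiff_step, if_neg hF, if_neg hM, if_pos hS]
      have hB : pvBStep c (some (PySem.Str.rstrip l), []) = ⟨c.summary ++
          [pvFmtFile c.current_file ++ ": " ++
            ("[" ++ PySem.Str.strip (PySem.Str.slice (PySem.Str.rstrip l) (some 8) none) ++ "]")],
          flushB c, c.current_file,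
          (match c.current_file with
            | some f => if pvTruthy f then
                some (pvFmtFile c.current_file ++ ": " ++
                  ("[" ++ PySem.Str.strip (PySem.Str.slice (PySem.Str.rstrip l) (some 8) none) ++ "]"),
                  ([] : List String))
              else none
            | none => none)⟩ := by
        simp only [pvBStep, if_neg hF, if_neg hM]
      rw [hA, hB]
      refine ⟨by rw [h1, h3], hfl, h3, rfl, ?_, fun hcon => by cases hcon⟩
      rw [← h3]
      cases stA.current_file with
      | none => rfl
      | some f =>
        by_cases htf : pvTruthy f = true
        · simp only [pvPendOf, if_pos htf, pvTruthy_brackets, Bool.and_true, pvFmtFile]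
        · simp only [pvPendOf, if_neg htf]
          simp [eq_false_of_ne_true htf]

-- invariant preservation: non-header line extends the open segment's body
theorem pvInv_nonheader (stA : AState) (stB : BState) (h : Option String) (body : List String)
    (l : String) (hh : ¬ pvIsHeader (PySem.Str.rstrip l) = true)
    (hi : pvInv stA stB h body) :
    pvInv (parse_pakdiff_step stA l) stB h (body ++ [PySem.Str.rstrip l]) := by
  obtain ⟨hF, hM, hS⟩ := pvNotHeader_cases _ hh
  obtain ⟨h1, h2, h3, h4, h5, h6⟩ := hi
  have hrec : parse_pakdiff_step stA l = ⟨stA.summary,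
      stA.method_content, stA.current_file, stA.current_method,
      (pvProcSeg (stA.current_content, stA.in_replace_with) (PySem.Str.rstrip l)).1,
      (pvProcSeg (stA.current_content, stA.in_replace_with) (PySem.Str.rstrip l)).2⟩ := by
    simp only [parse_pakdiff_step, pvProcSeg, if_neg hF, if_neg hM, if_neg hS]
    by_cases hR : PySem.Str.startswith (PySem.Str.rstrip l) "REPLACE_WITH:" = true
    · simp only [if_pos hR]
    · simp only [if_neg hR]
      by_cases hC : (stA.in_replace_with && pvTruthy (PySem.Str.strip (PySem.Str.rstrip l))) = true
      · simp only [hC, if_true]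
      · simp only [eq_false_of_ne_true hC]
        simp
  have s5 : ((parse_pakdiff_step stA l).current_content, (parse_pakdiff_step stA l).in_replace_with)
      = pvProcSeg (stA.current_content, stA.in_replace_with) (PySem.Str.rstrip l) := by
    rw [hrec]
  have hproc : pvProcBody (body ++ [PySem.Str.rstrip l])
      = pvProcSeg (pvProcBody body) (PySem.Str.rstrip l) := by
    simp [pvProcBody]
  cases h with
  | none =>
    have hm : stA.current_method = none := h6 rfl
    have hpn : pvPendOf stA.current_file stA.current_method body = none := by
      rw [hm]; cases stA.current_file <;> rfl
    refine ⟨?_, ?_, ?_, ?_, ?_, fun _ => by rw [hrec]; exact hm⟩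
    · show (parse_pakdiff_step stA l).summary = stB.summary
      rw [hrec]; exact h1
    · show (parse_pakdiff_step stA l).method_content = stB.method_content
      rw [hrec]; exact h2
    · show (parse_pakdiff_step stA l).current_file = stB.current_file
      rw [hrec]; exact h3
    · rw [s5, h4, hproc]
    · show stB.pending = _
      have hsb : stB.pending = none := by simpa [pvBStep] using h5.trans hpn
      rw [hsb, hrec, hm]
      cases stA.current_file <;> rfl
  | some header =>
    obtain ⟨b1, b2, b3, b4⟩ := pvBStep_body stB header body (body ++ [PySem.Str.rstrip l])
    refine ⟨?_, ?_, ?_, ?_, ?_, fun hcon => by cases hcon⟩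
    · rw [b1, hrec]; exact h1
    · rw [b2, hrec]; exact h2
    · rw [b3, hrec]; exact h3
    · rw [s5, h4, hproc]
    · rw [b4, hrec, h5]
      cases hcf : stA.current_file with
      | none => rfl
      | some f =>
        cases hcm : stA.current_method with
        | none => rfl
        | some m =>
          by_cases ht : (pvTruthy f && pvTruthy m) = true
          · simp [pvPendOf, ht]
          · simp [pvPendOf, eq_false_of_ne_true ht]

-- main coupling lemma
theorem pvMain (lines : List String) (stA : AState) (stB : BState)
    (h : Option String) (body : List String) (hi : pvInv stA stB h body) :
    pvRunA stA lines = pvRunB stB (pvSegsFrom h body lines) := by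
  induction lines generalizing stA stB h body with
  | nil =>
    have h1 := hi.1
    have hfl := pvFlush_eq stA stB h body hi
    simp only [pvRunA, pvRunB, pvSegsFrom, List.foldl_nil, List.nil_append, List.foldl_cons]
    rw [h1, hfl]
  | cons l rest ih =>
    by_cases hh : pvIsHeader (PySem.Str.rstrip l) = true
    · have hsegs : pvSegsFrom h body (l :: rest)
          = (h, body) :: pvSegsFrom (some (PySem.Str.rstrip l)) [] rest := by
        simp only [pvSegsFrom, List.foldl_cons, pvSegStep, if_pos hh]
        rw [pvSegStep_acc rest ([] ++ [(h, body)]) (some (PySem.Str.rstrip l)) []]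
        simp
      rw [hsegs]
      have hB : pvRunB stB ((h, body) :: pvSegsFrom (some (PySem.Str.rstrip l)) [] rest)
          = pvRunB (pvBStep stB (h, body)) (pvSegsFrom (some (PySem.Str.rstrip l)) [] rest) := rfl
      have hA : pvRunA stA (l :: rest) = pvRunA (parse_pakdiff_step stA l) rest := rfl
      rw [hA, hB]
      exact ih _ _ _ _ (pvInv_header stA stB h body l hh hi)
    · have hsegs : pvSegsFrom h body (l :: rest)
          = pvSegsFrom h (body ++ [PySem.Str.rstrip l]) rest := by
        simp only [pvSegsFrom, List.foldl_cons, pvSegStep, if_neg hh]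
      have hA : pvRunA stA (l :: rest) = pvRunA (parse_pakdiff_step stA l) rest := rfl
      rw [hA, hsegs]
      exact ih _ _ _ _ (pvInv_nonheader stA stB h body l hh hi)

-- ===== VERDICT (by name: the statement is the Claim_ definition above) =====
theorem parse_pakdiff_spec : Claim_equal_parse_pakdiff := by
  intro lines _
  show parse_pakdiff lines = parse_pakdiff_alt lines
  have := pvMain lines
    { summary := [], method_content := PySem.Dict.empty, current_file := none,
      current_method := none, current_content := [], in_replace_with := false }
    { summary := [], method_content := PySem.Dict.empty, current_file := none, pending := none }
    none [] (by refine ⟨rfl, rfl, rfl, rfl, rfl, fun _ => rfl⟩)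
  simpa [pvRunA, pvRunB, pvSegsFrom, parse_pakdiff, parse_pakdiff_alt, pvSegments] using this
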